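-- pv_equiv track=rewrite | github.com/deepflare/exphub | exphub/utils/paths.py | find_longest_common_suffix
-- ===== SOURCE A (Python) =====
-- def find_longest_common_suffix(all_paths, current_path):
--     """
--     Find the longest common suffix between the current_path and all other paths in all_paths.
--
--     Args:
--         all_paths (List[str]): A list of all path strings.
--         current_path (str): The path string for which the longest common suffix is calculated.
--
--     Returns:
--         int: The length of the longest common suffix.
--     """
--     max_common_suffix_length = 1
--     paths = [path for path in all_paths if path != current_path]
--     for i in range(1, len(current_path.split('/'))):
--         if any('/'.join((path.split('/')[-i:])) == '/'.join(current_path.split('/')[-i:])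
--                for path in paths
--                if len(path.split('/')) >= i):
--             max_common_suffix_length += 1
--         else:
--             break
--
--     return max_common_suffix_length
-- ===== SOURCE B (Python) =====
-- def _suffix_match_len(xs, ys):
--     """Number of leading positions where xs and ys agree (xs, ys already reversed)."""
--     k = 0
--     for x, y in zip(xs, ys):
--         if x != y:
--             break
--         k += 1
--     return k
--
--
-- def find_longest_common_suffix(all_paths, current_path):
--     cur_rev = current_path.split('/')[::-1]
--     best = 0
--     for path in all_paths:
--         if path != current_path:
--             k = _suffix_match_len(path.split('/')[::-1], cur_rev)
--             if k > best:
--                 best = k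
--     return 1 + min(best, len(cur_rev) - 1)
-- ===== Notes on version B (the rewrite author's own statement) =====
-- stated objective: alternative
-- what changed: Instead of re-splitting and re-joining every path at every depth i and scanning all paths per depth, B splits each path once, counts the trailing matching segments per path in a single pass, and returns 1 + min(max count, segments-1).
import Mathlib
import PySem

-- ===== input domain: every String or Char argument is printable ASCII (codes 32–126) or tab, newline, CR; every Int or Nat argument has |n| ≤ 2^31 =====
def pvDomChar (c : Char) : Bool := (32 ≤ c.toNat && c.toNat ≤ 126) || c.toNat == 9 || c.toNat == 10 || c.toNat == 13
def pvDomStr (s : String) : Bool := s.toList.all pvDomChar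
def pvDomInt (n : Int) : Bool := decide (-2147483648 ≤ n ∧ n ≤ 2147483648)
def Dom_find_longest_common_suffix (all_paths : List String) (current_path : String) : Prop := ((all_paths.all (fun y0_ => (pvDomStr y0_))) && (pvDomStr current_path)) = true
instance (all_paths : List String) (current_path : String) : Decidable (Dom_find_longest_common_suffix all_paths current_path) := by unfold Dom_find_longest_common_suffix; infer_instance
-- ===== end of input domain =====

-- B replaces A's per-depth rescan (re-splitting and re-joining every path at every depth)
-- by one split per path and a single trailing-segment-match count per path.

-- shared primitive: path.split('/') (sep nonempty, so split? is always `some`)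
def pvSplit (s : String) : List String := (PySem.Str.split? s "/").getD []

-- ===== PORT A =====
-- condition of A's `any('/'.join(path.split('/')[-i:]) == '/'.join(current_path.split('/')[-i:])
--                   for path in paths if len(path.split('/')) >= i)`
def pvCondA (paths : List String) (current_path : String) (i : Int) : Bool :=
  paths.any (fun path =>
    decide (i ≤ (Int.ofNat (pvSplit path).length)) &&
    (PySem.Str.join "/" (PySem.List.slice (pvSplit path) (some (-i)) none)
      == PySem.Str.join "/" (PySem.List.slice (pvSplit current_path) (some (-i)) none)))

-- A's `for i in range(1, …): if any(...): max_common_suffix_length += 1 else: break`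
def pvLoopA (paths : List String) (current_path : String) : List Int → Int → Int
  | [], acc => acc
  | i :: rest, acc =>
      if pvCondA paths current_path i then pvLoopA paths current_path rest (acc + 1) else acc

def find_longest_common_suffix (all_paths : List String) (current_path : String) : Int :=
  let paths := all_paths.filter (fun path => path != current_path)
  pvLoopA paths current_path
    (PySem.List.pyRange 1 (Int.ofNat (pvSplit current_path).length) 1) 1

-- ===== PORT B =====
-- Source B's _suffix_match_len: `for x, y in zip(xs, ys): if x != y: break; k += 1`
def pvSuffixMatchLen : List String → List String → Int
  | x :: xs, y :: ys => if x == y then 1 + pvSuffixMatchLen xs ys else 0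
  | _, _ => 0

def find_longest_common_suffix_alt (all_paths : List String) (current_path : String) : Int :=
  -- `[::-1]` ported as List.reverse (PySem.List.slice?_none_none_neg_one)
  let cur_rev := (pvSplit current_path).reverse
  let best := all_paths.foldl (fun best path =>
      if path != current_path then
        let k := pvSuffixMatchLen (pvSplit path).reverse cur_rev
        if k > best then k else best
      else best) 0
  1 + min best ((Int.ofNat cur_rev.length) - 1)

-- ===== PRECONDITION & SPEC =====
def Spec_find_longest_common_suffix (all_paths : List String) (current_path : String) (out : Int) : Prop := out = find_longest_common_suffix_alt all_paths current_path
instance (all_paths : List String) (current_path : String) (out : Int) : Decidable (Spec_find_longest_common_suffix all_paths current_path out) := by unfold Spec_find_longest_common_suffix; infer_instance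

-- ===== CLAIM (what is proved, stated in full; the proofs are below) =====
def Claim_equal_find_longest_common_suffix : Prop := ∀ (all_paths : List String) (current_path : String), Dom_find_longest_common_suffix all_paths current_path → Spec_find_longest_common_suffix all_paths current_path (find_longest_common_suffix all_paths current_path)

-- ===== LEMMAS AND PROOFS =====

-- a structural model of PySem.Chars.splitOn.go with sep = ['/']
def pvMS : List Char → List Char → List (List Char)
  | cur, [] => [cur]
  | cur, c :: rest => if c = '/' then cur :: pvMS [] rest else pvMS (cur ++ [c]) rest

theorem pvGo_eq : ∀ (fuel : Nat) (l cur : List Char) (acc : List (List Char)), l.length ≤ fuel →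
    PySem.Chars.splitOn.go ['/'] fuel l cur acc = acc.reverse ++ pvMS cur.reverse l := by
  intro fuel
  induction fuel with
  | zero =>
    intro l cur acc h
    have : l = [] := List.eq_nil_of_length_eq_zero (Nat.le_zero.mp h)
    subst this
    simp [PySem.Chars.splitOn.go, pvMS]
  | succ f ih =>
    intro l cur acc h
    cases l with
    | nil => simp [PySem.Chars.splitOn.go, pvMS]
    | cons c rest =>
      simp only [PySem.Chars.splitOn.go]
      by_cases hc : c = '/'
      · subst hc
        rw [if_pos (by simp [List.isPrefixOf])]
        rw [ih _ _ _ (by simpa using Nat.le_of_succ_le_succ h)]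
        simp [pvMS]
      · rw [if_neg (by simp [List.isPrefixOf]; exact fun hh => hc hh.symm)]
        rw [ih _ _ _ (by simpa using Nat.le_of_succ_le_succ h)]
        simp [pvMS, hc]

theorem pvSplit_eq (s : String) : pvSplit s = (pvMS [] s.toList).map String.ofList := by
  have h := pvGo_eq (s.toList.length + 1) s.toList [] [] (by omega)
  simp only [pvSplit, PySem.Str.split?, PySem.Chars.split?]
  rw [if_neg (by simp)]
  simp only [Option.map_some, Option.getD_some, PySem.Chars.splitOn]
  have : ("/" : String).toList = ['/'] := by decide
  rw [this, h]
  simp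

theorem pvMS_ne_nil (cur l : List Char) : pvMS cur l ≠ [] := by
  induction l generalizing cur with
  | nil => simp [pvMS]
  | cons c rest ih =>
    simp only [pvMS]
    split <;> simp [ih]

theorem pvMS_free : ∀ (l cur : List Char), '/' ∉ cur → ∀ p ∈ pvMS cur l, '/' ∉ p := by
  intro l
  induction l with
  | nil => intro cur h p hp; simp [pvMS] at hp; subst hp; exact h
  | cons c rest ih =>
    intro cur h p hp
    simp only [pvMS] at hp
    split at hp
    · rcases List.mem_cons.mp hp with rfl | hp
      · exact h
      · exact ih [] (by simp) p hp
    · rename_i hc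
      refine ih (cur ++ [c]) ?_ p hp
      intro hm
      rcases List.mem_append.mp hm with hm | hm
      · exact h hm
      · simp at hm; exact hc hm.symm

theorem pvSplit_ne_nil (s : String) : pvSplit s ≠ [] := by
  rw [pvSplit_eq]
  intro h
  exact pvMS_ne_nil [] s.toList (List.map_eq_nil_iff.mp h)

theorem pvSplit_free (s : String) : ∀ p ∈ pvSplit s, '/' ∉ p.toList := by
  rw [pvSplit_eq]
  intro p hp
  obtain ⟨q, hq, rfl⟩ := List.mem_map.mp hp
  rw [String.toList_ofList]
  exact pvMS_free s.toList [] (by simp) q hq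

-- '/'-free segments glue back uniquely
theorem pvSeg_inj : ∀ (u v t1 t2 : List Char), '/' ∉ u → '/' ∉ v →
    u ++ '/' :: t1 = v ++ '/' :: t2 → u = v ∧ t1 = t2 := by
  intro u
  induction u with
  | nil =>
    intro v t1 t2 _ hv h
    cases v with
    | nil => simpa using h
    | cons b v' =>
      simp at h
      exact False.elim (hv (by rw [h.1]; exact List.mem_cons_self))
  | cons a u' ih =>
    intro v t1 t2 hu hv h
    cases v with
    | nil =>
      simp at h
      exact False.elim (hu (by rw [← h.1]; exact List.mem_cons_self))
    | cons b v' =>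
      simp at h
      obtain ⟨rfl, h2⟩ := h
      have := ih v' t1 t2 (fun hm => hu (List.mem_cons_of_mem _ hm)) (fun hm => hv (List.mem_cons_of_mem _ hm)) h2
      exact ⟨by rw [this.1], this.2⟩

theorem pvJoin_inj : ∀ (xs ys : List (List Char)), xs.length = ys.length →
    (∀ p ∈ xs, '/' ∉ p) → (∀ p ∈ ys, '/' ∉ p) →
    List.intercalate ['/'] xs = List.intercalate ['/'] ys → xs = ys := by
  intro xs
  induction xs with
  | nil => intro ys h _ _ _; cases ys <;> simp_all
  | cons a xs' ih =>
    intro ys h hx hy hj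
    cases ys with
    | nil => simp at h
    | cons b ys' =>
      cases xs' with
      | nil =>
        cases ys' with
        | nil => simp [List.intercalate] at hj; simp [hj]
        | cons => simp at h
      | cons a2 xs'' =>
        cases ys' with
        | nil => simp at h
        | cons b2 ys'' =>
          have e1 : List.intercalate ['/'] (a :: a2 :: xs'') = a ++ '/' :: List.intercalate ['/'] (a2 :: xs'') := by
            simp [List.intercalate, List.intersperse]
          have e2 : List.intercalate ['/'] (b :: b2 :: ys'') = b ++ '/' :: List.intercalate ['/'] (b2 :: ys'') := by
            simp [List.intercalate, List.intersperse]
          rw [e1, e2] at hj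
          have hab := pvSeg_inj a b _ _ (hx a (by simp)) (hy b (by simp)) hj
          have := ih (b2 :: ys'') (by simpa using h)
            (fun p hp => hx p (List.mem_cons_of_mem _ hp))
            (fun p hp => hy p (List.mem_cons_of_mem _ hp)) hab.2
          rw [hab.1, this]

theorem pvSuffixMatchLen_nonneg (xs ys : List String) : 0 ≤ pvSuffixMatchLen xs ys := by
  induction xs generalizing ys with
  | nil => simp [pvSuffixMatchLen]
  | cons x xs ih =>
    cases ys with
    | nil => simp [pvSuffixMatchLen]
    | cons y ys =>
      simp only [pvSuffixMatchLen]
      split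
      · have := ih ys; omega
      · omega

theorem pvSuffixMatchLen_ge_iff : ∀ (xs ys : List String) (i : Nat),
    ((i : Int) ≤ pvSuffixMatchLen xs ys) ↔
      (i ≤ xs.length ∧ i ≤ ys.length ∧ xs.take i = ys.take i) := by
  intro xs
  induction xs with
  | nil =>
    intro ys i
    have h0 : pvSuffixMatchLen [] ys = 0 := by cases ys <;> rfl
    rw [h0]
    constructor
    · intro h
      have : i = 0 := by omega
      subst this; simp
    · rintro ⟨h, -, -⟩
      simp only [List.length_nil] at h
      omega
  | cons x xs ih =>
    intro ys i
    cases ys with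
    | nil =>
      have h0 : pvSuffixMatchLen (x :: xs) [] = 0 := rfl
      rw [h0]
      constructor
      · intro h
        have : i = 0 := by omega
        subst this; simp
      · rintro ⟨-, h, -⟩
        simp only [List.length_nil] at h
        omega
    | cons y ys =>
      cases i with
      | zero => simp [pvSuffixMatchLen_nonneg]
      | succ j =>
        simp only [pvSuffixMatchLen]
        by_cases hxy : x = y
        · subst hxy
          simp only [beq_self_eq_true, if_true]
          have hrec := ih ys j
          constructor
          · intro h
            have hj : (j : Int) ≤ pvSuffixMatchLen xs ys := by push_cast at h ⊢; omega
            obtain ⟨h1, h2, h3⟩ := hrec.mp hj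
            refine ⟨by simpa using h1, by simpa using h2, ?_⟩
            simp [List.take_succ_cons, h3]
          · rintro ⟨h1, h2, h3⟩
            simp only [List.take_succ_cons, List.cons.injEq, true_and] at h3
            have hj := hrec.mpr ⟨by simpa using h1, by simpa using h2, h3⟩
            push_cast at hj ⊢; omega
        · rw [if_neg (by simpa using hxy)]
          constructor
          · intro h; exfalso; push_cast at h; omega
          · rintro ⟨-, -, h3⟩
            simp only [List.take_succ_cons, List.cons.injEq] at h3
            exact absurd h3.1 hxy

theorem pvStr_toList_inj : Function.Injective String.toList := by
  intro a b h
  have := congrArg String.ofList h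
  simpa [String.ofList_toList] using this

-- per-path: A's join test at depth k equals "k trailing segments of the splits match"
theorem pvCond_iff (p cur : String) (k : Nat) (hk : 1 ≤ k) (hkn : k < (pvSplit cur).length) :
    ((decide ((k : Int) ≤ (Int.ofNat (pvSplit p).length)) &&
      (PySem.Str.join "/" (PySem.List.slice (pvSplit p) (some (-(k : Int))) none)
        == PySem.Str.join "/" (PySem.List.slice (pvSplit cur) (some (-(k : Int))) none))) = true)
    ↔ (k : Int) ≤ pvSuffixMatchLen (pvSplit p).reverse (pvSplit cur).reverse := by
  set sp := pvSplit p with hsp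
  set cs := pvSplit cur with hcs
  rw [Bool.and_eq_true, decide_eq_true_iff, beq_iff_eq]
  simp only [Int.ofNat_eq_natCast]
  rw [PySem.List.slice_from_neg_natCast sp k hk, PySem.List.slice_from_neg_natCast cs k hk]
  rw [pvSuffixMatchLen_ge_iff]
  simp only [List.length_reverse, List.take_reverse, List.reverse_inj]
  constructor
  · rintro ⟨h1, h2⟩
    have hlp : k ≤ sp.length := by omega
    refine ⟨hlp, by omega, ?_⟩
    have h3 := congrArg String.toList h2
    rw [PySem.Str.toList_join, PySem.Str.toList_join] at h3
    have hsep : ("/" : String).toList = ['/'] := by decide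
    rw [hsep] at h3
    have := pvJoin_inj (List.map String.toList (sp.drop (sp.length - k)))
      (List.map String.toList (cs.drop (cs.length - k)))
      (by simp [List.length_drop]; omega)
      (by intro q hq
          obtain ⟨r, hr, rfl⟩ := List.mem_map.mp hq
          exact pvSplit_free p r (hsp ▸ List.mem_of_mem_drop hr))
      (by intro q hq
          obtain ⟨r, hr, rfl⟩ := List.mem_map.mp hq
          exact pvSplit_free cur r (hcs ▸ List.mem_of_mem_drop hr))
      (by simpa [PySem.Chars.join] using h3)
    exact List.map_injective_iff.mpr pvStr_toList_inj this
  · rintro ⟨h1, h2, h3⟩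
    exact ⟨by omega, by rw [h3]⟩

-- B's fold characterised: its value is ≥ i iff acc is or some other path matches i trailing segments
theorem pvFoldB_ge_iff (cur : String) (i : Int) : ∀ (l : List String) (acc : Int),
    (i ≤ l.foldl (fun best path =>
        if path != cur then
          let k := pvSuffixMatchLen (pvSplit path).reverse (pvSplit cur).reverse
          if k > best then k else best
        else best) acc)
    ↔ (i ≤ acc ∨ ∃ p ∈ l, p ≠ cur ∧ i ≤ pvSuffixMatchLen (pvSplit p).reverse (pvSplit cur).reverse) := by
  intro l
  induction l with
  | nil => simp
  | cons q l ih =>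
    intro acc
    rw [List.foldl_cons, ih]
    by_cases hq : q = cur
    · subst hq
      simp only [bne_self_eq_false]
      constructor
      · rintro (h | h)
        · exact Or.inl h
        · exact Or.inr (by obtain ⟨p, hp, h⟩ := h; exact ⟨p, List.mem_cons_of_mem _ hp, h⟩)
      · rintro (h | ⟨p, hp, hne, h⟩)
        · exact Or.inl h
        · rcases List.mem_cons.mp hp with rfl | hp
          · exact absurd rfl hne
          · exact Or.inr ⟨p, hp, hne, h⟩
    · rw [if_pos (by simpa using hq)]
      simp only
      constructor
      · rintro (h | h)
        · split at h
          · exact Or.inr ⟨q, List.mem_cons_self, hq, by omega⟩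
          · exact Or.inl h
        · obtain ⟨p, hp, hne, h⟩ := h
          exact Or.inr ⟨p, List.mem_cons_of_mem _ hp, hne, h⟩
      · rintro (h | ⟨p, hp, hne, h⟩)
        · left; split <;> omega
        · rcases List.mem_cons.mp hp with rfl | hp
          · left; split <;> omega
          · exact Or.inr ⟨p, hp, hne, h⟩

-- A's loop on range [a, n) with a condition equivalent to `i ≤ best`
theorem pvLoopA_eval (paths : List String) (cur : String) (n best : Int)
    (hf : ∀ i : Int, 1 ≤ i → i < n → (pvCondA paths cur i = true ↔ i ≤ best)) :
    ∀ (m : Nat) (a acc : Int), 1 ≤ a → (n - a).toNat ≤ m →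
      pvLoopA paths cur (PySem.List.pyRange a n 1) acc = acc + max 0 (min best (n - 1) - a + 1) := by
  intro m
  induction m with
  | zero =>
    intro a acc ha hm
    have hna : n ≤ a := by omega
    rw [PySem.List.pyRange_one_eq_nil hna]
    simp only [pvLoopA]
    have : min best (n - 1) - a + 1 ≤ 0 := by omega
    omega
  | succ m ih =>
    intro a acc ha hm
    by_cases han : a < n
    · rw [PySem.List.pyRange_one_cons han]
      simp only [pvLoopA]
      by_cases hc : pvCondA paths cur a = true
      · rw [if_pos hc]
        have hab : a ≤ best := (hf a ha han).mp hc
        rw [ih (a + 1) (acc + 1) (by omega) (by omega)]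
        have : min best (n - 1) ≥ a := by omega
        omega
      · rw [if_neg hc]
        have hab : ¬ (a ≤ best) := fun h => hc ((hf a ha han).mpr h)
        have : min best (n - 1) - a + 1 ≤ 0 := by omega
        omega
    · rw [PySem.List.pyRange_one_eq_nil (by omega)]
      simp only [pvLoopA]
      have : min best (n - 1) - a + 1 ≤ 0 := by omega
      omega

-- ===== VERDICT (by name: the statement is the Claim_ definition above) =====
theorem find_longest_common_suffix_spec : Claim_equal_find_longest_common_suffix := by
  intro all_paths current_path _
  unfold Spec_find_longest_common_suffix
  unfold find_longest_common_suffix find_longest_common_suffix_alt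
  simp only []
  set cs := pvSplit current_path with hcs
  set n : Int := Int.ofNat cs.length with hn
  set paths := all_paths.filter (fun path => path != current_path) with hpaths
  set best := all_paths.foldl (fun best path =>
      if path != current_path then
        let k := pvSuffixMatchLen (pvSplit path).reverse cs.reverse
        if k > best then k else best
      else best) 0 with hbest
  have hn1 : 1 ≤ n := by
    have h := List.length_pos_of_ne_nil (pvSplit_ne_nil current_path)
    rw [← hcs] at h
    simp only [hn, Int.ofNat_eq_natCast]
    omega
  have hbest0 : 0 ≤ best := by
    rw [hbest, pvFoldB_ge_iff]
    exact Or.inl le_rfl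
  have hf : ∀ i : Int, 1 ≤ i → i < n → (pvCondA paths current_path i = true ↔ i ≤ best) := by
    intro i hi hin
    have hik : i = ((i.toNat : Nat) : Int) := by omega
    rw [pvCondA, List.any_eq_true, hbest, pvFoldB_ge_iff]
    constructor
    · rintro ⟨p, hp, hcond⟩
      obtain ⟨hpmem, hpne⟩ := List.mem_filter.mp (hpaths ▸ hp)
      refine Or.inr ⟨p, hpmem, by simpa using hpne, ?_⟩
      rw [hik] at hcond ⊢
      exact (pvCond_iff p current_path i.toNat (by omega)
        (by rw [← hcs]; simp only [hn, Int.ofNat_eq_natCast] at hin; omega)).mp hcond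
    · rintro (h | ⟨p, hp, hne, h⟩)
      · omega
      · refine ⟨p, hpaths ▸ List.mem_filter.mpr ⟨hp, by simpa using hne⟩, ?_⟩
        rw [hik] at h ⊢
        exact (pvCond_iff p current_path i.toNat (by omega)
          (by rw [← hcs]; simp only [hn, Int.ofNat_eq_natCast] at hin; omega)).mpr h
  rw [pvLoopA_eval paths current_path n best hf ((n - 1).toNat) 1 1 le_rfl (by omega)]
  simp only [List.length_reverse]
  omega
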